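-- pv_equiv track=rewrite | github.com/Bo36259othBird/envoy-cfg | envoy_cfg/merge.py | merge_summary
-- ===== SOURCE A (Python) =====
-- from typing import Dict, Optional
--
-- def merge_summary(
--     base: Dict[str, str],
--     incoming: Dict[str, str],
--     merged: Dict[str, str],
-- ) -> Dict[str, int]:
--     """Return a summary of what happened during the merge."""
--     added = len(set(merged) - set(base))
--     removed = len(set(base) - set(merged))
--     overwritten = sum(
--         1 for k in base
--         if k in incoming and base[k] != incoming[k] and k in merged
--     )
--     unchanged = len(merged) - added - overwritten
--     return {
--         "added": added,
--         "removed": removed,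
--         "overwritten": overwritten,
--         "unchanged": max(unchanged, 0),
--         "total": len(merged),
--     }
-- ===== SOURCE B (Python) =====
-- from typing import Dict
--
--
-- def merge_summary(
--     base: Dict[str, str],
--     incoming: Dict[str, str],
--     merged: Dict[str, str],
-- ) -> Dict[str, int]:
--     """Return a summary of what happened during the merge."""
--     added = overwritten = unchanged = 0
--     for k in merged:
--         if k not in base:
--             added += 1
--         elif k in incoming and base[k] != incoming[k]:
--             overwritten += 1
--         else:
--             unchanged += 1
--     removed = 0
--     for k in base:
--         if k not in merged:
--             removed += 1
--     return {
--         "added": added,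
--         "removed": removed,
--         "overwritten": overwritten,
--         "unchanged": unchanged,
--         "total": len(merged),
--     }
-- ===== Notes on version B (the rewrite author's own statement) =====
-- stated objective: simpler
-- what changed: Replaced the set-difference constructions and the arithmetic derivation of 'unchanged' (len - added - overwritten, clamped by max) with two plain counting passes that classify each merged key as added/overwritten/unchanged and each base key as removed, so no temporary sets are built and every counter is counted directly.
import Mathlib
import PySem

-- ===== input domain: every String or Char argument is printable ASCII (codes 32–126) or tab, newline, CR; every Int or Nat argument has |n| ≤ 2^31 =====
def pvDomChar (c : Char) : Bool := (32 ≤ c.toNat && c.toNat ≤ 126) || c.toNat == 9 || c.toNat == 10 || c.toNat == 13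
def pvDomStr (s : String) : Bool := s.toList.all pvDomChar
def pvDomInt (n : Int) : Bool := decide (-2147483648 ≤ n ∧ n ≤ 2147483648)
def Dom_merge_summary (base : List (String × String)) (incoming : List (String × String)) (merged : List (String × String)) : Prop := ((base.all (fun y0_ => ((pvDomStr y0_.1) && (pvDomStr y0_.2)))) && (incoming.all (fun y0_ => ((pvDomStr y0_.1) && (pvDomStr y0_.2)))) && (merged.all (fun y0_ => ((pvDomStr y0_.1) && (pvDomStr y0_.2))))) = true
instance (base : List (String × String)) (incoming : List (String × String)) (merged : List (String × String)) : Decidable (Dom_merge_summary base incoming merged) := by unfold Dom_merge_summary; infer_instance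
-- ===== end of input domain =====

-- B replaces A's set differences and the arithmetic 'unchanged = len - added - overwritten' with two
-- direct counting passes that classify each key; same results, a plainer decomposition (no speed claim).

-- ===== PORT A =====
def merge_summary (base : List (String × String)) (incoming : List (String × String)) (merged : List (String × String)) : List (String × Int) :=
  let bD := PySem.Dict.mk base
  let iD := PySem.Dict.mk incoming
  let mD := PySem.Dict.mk merged
  let added : Int := PySem.Set.len (PySem.Set.diff (PySem.Set.ofList mD.keys) (PySem.Set.ofList bD.keys))
  let removed : Int := PySem.Set.len (PySem.Set.diff (PySem.Set.ofList bD.keys) (PySem.Set.ofList mD.keys))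
  let overwritten : Int :=
    (bD.keys.map (fun k =>
      if iD.contains k && decide (bD.get? k ≠ iD.get? k) && mD.contains k then (1 : Int) else 0)).sum
  let unchanged : Int := (mD.size : Int) - added - overwritten
  [("added", added), ("removed", removed), ("overwritten", overwritten),
   ("unchanged", max unchanged 0), ("total", (mD.size : Int))]

-- ===== PORT B =====
def merge_summary_alt (base : List (String × String)) (incoming : List (String × String)) (merged : List (String × String)) : List (String × Int) :=
  let bD := PySem.Dict.mk base
  let iD := PySem.Dict.mk incoming
  let mD := PySem.Dict.mk merged
  let c : Int × Int × Int := merged.foldl (fun s kv =>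
      if !bD.contains kv.1 then (s.1 + 1, s.2.1, s.2.2)
      else if iD.contains kv.1 && decide (bD.get? kv.1 ≠ iD.get? kv.1) then (s.1, s.2.1 + 1, s.2.2)
      else (s.1, s.2.1, s.2.2 + 1)) (0, 0, 0)
  let removed : Int := base.foldl (fun r kv => if !mD.contains kv.1 then r + 1 else r) 0
  [("added", c.1), ("removed", removed), ("overwritten", c.2.1),
   ("unchanged", c.2.2), ("total", (merged.length : Int))]

-- ===== PRECONDITION & SPEC =====
-- Pre_ requires each association list to have pairwise-distinct keys: that is the invariant of the
-- Python dicts merge_summary receives — a list with a duplicate key denotes no Python dict input at all.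
def Pre_merge_summary (base : List (String × String)) (incoming : List (String × String)) (merged : List (String × String)) : Prop :=
  (base.map (fun kv => kv.1)).Nodup ∧ (incoming.map (fun kv => kv.1)).Nodup ∧ (merged.map (fun kv => kv.1)).Nodup
instance (base : List (String × String)) (incoming : List (String × String)) (merged : List (String × String)) : Decidable (Pre_merge_summary base incoming merged) := by unfold Pre_merge_summary; infer_instance
def pvWitness_merge_summary : (List (String × String)) × (List (String × String)) × (List (String × String)) :=
  ([("a", "1"), ("b", "2")], [("b", "3"), ("c", "4")], [("a", "1"), ("b", "3"), ("c", "4")])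

def Spec_merge_summary (base : List (String × String)) (incoming : List (String × String)) (merged : List (String × String)) (out : List (String × Int)) : Prop := out = merge_summary_alt base incoming merged
instance (base : List (String × String)) (incoming : List (String × String)) (merged : List (String × String)) (out : List (String × Int)) : Decidable (Spec_merge_summary base incoming merged out) := by unfold Spec_merge_summary; infer_instance

-- ===== CLAIM (what is proved, stated in full; the proofs are below) =====
def Claim_equal_merge_summary : Prop := ∀ (base : List (String × String)) (incoming : List (String × String)) (merged : List (String × String)), Dom_merge_summary base incoming merged → Pre_merge_summary base incoming merged → Spec_merge_summary base incoming merged (merge_summary base incoming merged)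

-- ===== LEMMAS AND PROOFS =====

-- membership reading of Dict.contains on a raw association list
theorem dictContains_iff (ps : List (String × String)) (k : String) :
    (PySem.Dict.mk ps).contains k = true ↔ k ∈ ps.map (fun kv => kv.1) := by
  simp [PySem.Dict.contains, List.any_eq_true, List.mem_map]

-- Set.contains on ofList read as plain membership
theorem setContains_iff (xs : List String) (k : String) :
    (PySem.Set.ofList xs).contains k = true ↔ k ∈ xs := by
  simp [PySem.Set.contains, PySem.Set.mem_ofList]

-- A's set-difference count equals B's per-element count over the source dict's items
theorem diff_len_eq_countP (b m : List (String × String))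
    (hm : (m.map (fun kv => kv.1)).Nodup) :
    PySem.Set.len (PySem.Set.diff (PySem.Set.ofList ((PySem.Dict.mk m).keys)) (PySem.Set.ofList ((PySem.Dict.mk b).keys)))
      = (m.countP (fun kv => !(PySem.Dict.mk b).contains kv.1) : Int) := by
  simp only [PySem.Set.len, PySem.Set.diff]
  congr 1
  rw [← List.countP_eq_length_filter]
  have hperm : (PySem.Set.ofList ((PySem.Dict.mk m).keys)).Perm ((PySem.Dict.mk m).keys) :=
    (List.perm_ext_iff_of_nodup (PySem.Set.nodup_ofList _) hm).mpr
      (fun a => PySem.Set.mem_ofList _ a)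
  rw [hperm.countP_eq]
  rw [List.countP_congr (q := fun k => !(PySem.Dict.mk b).contains k) ?_]
  · exact List.countP_map
  · intro k _
    rw [Bool.not_eq_true', Bool.not_eq_true', Bool.eq_false_iff, Bool.eq_false_iff]
    exact not_congr ((setContains_iff _ _).trans (dictContains_iff _ _).symm)

-- classifying fold of B expressed as three countP's
theorem classify_foldl (bD iD : PySem.Dict String String) (l : List (String × String)) (a b c : Int) :
    l.foldl (fun s kv =>
      if !bD.contains kv.1 then (s.1 + 1, s.2.1, s.2.2)
      else if iD.contains kv.1 && decide (bD.get? kv.1 ≠ iD.get? kv.1) then (s.1, s.2.1 + 1, s.2.2)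
      else (s.1, s.2.1, s.2.2 + 1)) (a, b, c)
    = (a + (l.countP (fun kv => !bD.contains kv.1) : Int),
       b + (l.countP (fun kv => bD.contains kv.1 && (iD.contains kv.1 && decide (bD.get? kv.1 ≠ iD.get? kv.1))) : Int),
       c + (l.countP (fun kv => bD.contains kv.1 && !(iD.contains kv.1 && decide (bD.get? kv.1 ≠ iD.get? kv.1))) : Int)) := by
  induction l generalizing a b c with
  | nil => simp
  | cons kv t ih =>
    cases hb : bD.contains kv.1 with
    | false =>
      simp only [List.foldl_cons, List.countP_cons, hb, Bool.not_false, Bool.false_and,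
        Bool.false_eq_true, if_false, reduceIte, ih]
      refine congrArg₂ Prod.mk ?_ (congrArg₂ Prod.mk ?_ ?_) <;> push_cast <;> omega
    | true =>
      cases hc : (iD.contains kv.1 && decide (bD.get? kv.1 ≠ iD.get? kv.1)) with
      | false =>
        simp only [List.foldl_cons, List.countP_cons, hb, hc, Bool.not_true, Bool.not_false,
          Bool.true_and, Bool.false_eq_true, if_false, reduceIte, ih]
        refine congrArg₂ Prod.mk ?_ (congrArg₂ Prod.mk ?_ ?_) <;> push_cast <;> omega
      | true =>
        simp only [List.foldl_cons, List.countP_cons, hb, hc, Bool.not_true,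
          Bool.true_and, Bool.false_eq_true, if_false, reduceIte, ih]
        refine congrArg₂ Prod.mk ?_ (congrArg₂ Prod.mk ?_ ?_) <;> push_cast <;> omega

-- the three classes partition the merged items
theorem partition_countP (bD iD : PySem.Dict String String) (l : List (String × String)) :
    l.countP (fun kv => !bD.contains kv.1)
      + l.countP (fun kv => bD.contains kv.1 && (iD.contains kv.1 && decide (bD.get? kv.1 ≠ iD.get? kv.1)))
      + l.countP (fun kv => bD.contains kv.1 && !(iD.contains kv.1 && decide (bD.get? kv.1 ≠ iD.get? kv.1)))
    = l.length := by
  induction l with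
  | nil => simp
  | cons kv t ih =>
    cases hb : bD.contains kv.1 with
    | false =>
      simp only [List.countP_cons, List.length_cons, hb, Bool.not_false, Bool.false_and,
        Bool.false_eq_true, if_false, reduceIte]
      omega
    | true =>
      cases hc : (iD.contains kv.1 && decide (bD.get? kv.1 ≠ iD.get? kv.1)) with
      | false =>
        simp only [List.countP_cons, List.length_cons, hb, hc, Bool.not_true, Bool.not_false,
          Bool.true_and, Bool.false_eq_true, if_false, reduceIte]
        omega
      | true =>
        simp only [List.countP_cons, List.length_cons, hb, hc, Bool.not_true,
          Bool.true_and, Bool.false_eq_true, if_false, reduceIte]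
        omega

-- A's overwritten count over base equals B's overwritten count over merged
theorem overwritten_eq (base incoming merged : List (String × String))
    (hb : (base.map (fun kv => kv.1)).Nodup) (hm : (merged.map (fun kv => kv.1)).Nodup) :
    ((PySem.Dict.mk base).keys).countP (fun k =>
        (PySem.Dict.mk incoming).contains k
          && decide ((PySem.Dict.mk base).get? k ≠ (PySem.Dict.mk incoming).get? k)
          && (PySem.Dict.mk merged).contains k)
    = (merged.countP (fun kv =>
        (PySem.Dict.mk base).contains kv.1
          && ((PySem.Dict.mk incoming).contains kv.1
              && decide ((PySem.Dict.mk base).get? kv.1 ≠ (PySem.Dict.mk incoming).get? kv.1)))) := by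
  have hmap : List.countP (fun k =>
        (PySem.Dict.mk base).contains k
          && ((PySem.Dict.mk incoming).contains k
              && decide ((PySem.Dict.mk base).get? k ≠ (PySem.Dict.mk incoming).get? k)))
        ((PySem.Dict.mk merged).keys)
      = merged.countP (fun kv =>
        (PySem.Dict.mk base).contains kv.1
          && ((PySem.Dict.mk incoming).contains kv.1
              && decide ((PySem.Dict.mk base).get? kv.1 ≠ (PySem.Dict.mk incoming).get? kv.1))) :=
    List.countP_map
  rw [← hmap]
  rw [List.countP_eq_length_filter, List.countP_eq_length_filter]
  apply List.Perm.length_eq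
  rw [show (PySem.Dict.mk base).keys = base.map (fun kv => kv.1) from rfl,
    show (PySem.Dict.mk merged).keys = merged.map (fun kv => kv.1) from rfl]
  rw [List.perm_ext_iff_of_nodup (hb.filter _) (hm.filter _)]
  intro k
  simp only [List.mem_filter, Bool.and_eq_true, decide_eq_true_eq, dictContains_iff]
  tauto

-- ===== VERDICT (by name: the statement is the Claim_ definition above) =====
theorem merge_summary_spec : Claim_equal_merge_summary := by
  intro base incoming merged _ hpre
  obtain ⟨hb, _, hm⟩ := hpre
  unfold Spec_merge_summary
  simp only [merge_summary, merge_summary_alt]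
  rw [classify_foldl, PySem.List.foldl_count_if, PySem.List.sum_map_ite_one_zero,
    diff_len_eq_countP base merged hm, diff_len_eq_countP merged base hb,
    overwritten_eq base incoming merged hb hm]
  have hsz : (PySem.Dict.mk merged).size = merged.length := rfl
  have hpart : ((merged.countP (fun kv => !(PySem.Dict.mk base).contains kv.1) : Int)
      + (merged.countP (fun kv => (PySem.Dict.mk base).contains kv.1
          && ((PySem.Dict.mk incoming).contains kv.1
              && decide ((PySem.Dict.mk base).get? kv.1 ≠ (PySem.Dict.mk incoming).get? kv.1))) : Int)
      + (merged.countP (fun kv => (PySem.Dict.mk base).contains kv.1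
          && !((PySem.Dict.mk incoming).contains kv.1
              && decide ((PySem.Dict.mk base).get? kv.1 ≠ (PySem.Dict.mk incoming).get? kv.1))) : Int))
      = (merged.length : Int) := by
    exact_mod_cast partition_countP (PySem.Dict.mk base) (PySem.Dict.mk incoming) merged
  rw [hsz]
  dsimp only
  refine congrArg₂ List.cons (congrArg _ ?_) (congrArg₂ List.cons (congrArg _ ?_)
    (congrArg₂ List.cons (congrArg _ ?_) (congrArg₂ List.cons (congrArg _ ?_)
    (congrArg₂ List.cons (congrArg _ ?_) rfl)))) <;> omega
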